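-- pv_equiv track=rewrite | github.com/FabioOrtiz/codificationJPG | matricesCompletas.py | devolverMatrices
-- ===== SOURCE A (Python) =====
-- def devolverMatrices(matrices):
--     provisional = []
--     verificador = 0
--     matrices_completas = []
--
--     for i in matrices:
--         for j in i:
--             if verificador < 8:
--                 provisional.insert(len(provisional), j)
--                 verificador = verificador + 1
--                 if verificador == 8:
--                     matrices_completas.insert(len(matrices_completas), provisional)
--                     provisional=[]
--                     verificador = 0
--
--     return matrices_completas
-- ===== SOURCE B (Python) =====
-- def devolverMatrices(matrices):
--     flat = [j for i in matrices for j in i]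
--     return [flat[k * 8:(k + 1) * 8] for k in range(len(flat) // 8)]
-- ===== Notes on version B (the rewrite author's own statement) =====
-- stated objective: simpler
-- what changed: Replaces the interleaved accumulate-and-flush loop with a counter by two separate passes: flatten everything, then take complete windows of 8 by slicing (len(flat)//8 drops the incomplete tail).
import Mathlib
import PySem

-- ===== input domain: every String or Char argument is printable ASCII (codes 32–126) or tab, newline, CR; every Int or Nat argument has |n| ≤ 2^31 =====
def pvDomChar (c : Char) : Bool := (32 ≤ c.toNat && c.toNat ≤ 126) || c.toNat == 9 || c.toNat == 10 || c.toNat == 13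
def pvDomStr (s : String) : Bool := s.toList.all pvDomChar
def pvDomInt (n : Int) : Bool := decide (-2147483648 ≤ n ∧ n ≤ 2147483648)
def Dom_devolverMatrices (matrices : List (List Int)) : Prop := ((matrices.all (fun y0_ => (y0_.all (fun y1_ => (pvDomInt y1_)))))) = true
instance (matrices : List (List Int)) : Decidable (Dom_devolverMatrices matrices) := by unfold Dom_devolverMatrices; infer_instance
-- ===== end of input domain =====

-- B replaces A's interleaved accumulate-and-flush loop (counter + flush at 8) by two
-- separate passes: flatten everything, then slice complete windows of 8 (simpler).


-- ===== PORT A =====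
-- one step of A's inner loop body on the state (provisional, verificador, matrices_completas)
def devAStep (s : List Int × Int × List (List Int)) (j : Int) : List Int × Int × List (List Int) :=
  match s with
  | (provisional, verificador, completas) =>
    if verificador < 8 then
      let provisional2 := PySem.List.insert provisional (provisional.length : Int) j
      let verificador2 := verificador + 1
      if verificador2 = 8 then
        ([], 0, PySem.List.insert completas (completas.length : Int) provisional2)
      else (provisional2, verificador2, completas)
    else (provisional, verificador, completas)

def devolverMatrices (matrices : List (List Int)) : List (List Int) :=
  (matrices.foldl (fun s i => i.foldl devAStep s) ([], 0, [])).2.2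

-- ===== PORT B =====
def devolverMatrices_alt (matrices : List (List Int)) : List (List Int) :=
  let flat := matrices.foldl (fun acc i => acc ++ i) []
  (PySem.List.pyRange 0 (PySem.Int.floordiv (flat.length : Int) 8) 1).map
    (fun k => PySem.List.slice flat (some (k * 8)) (some ((k + 1) * 8)))

-- ===== PRECONDITION & SPEC =====
def Spec_devolverMatrices (matrices : List (List Int)) (out : List (List Int)) : Prop := out = devolverMatrices_alt matrices
instance (matrices : List (List Int)) (out : List (List Int)) : Decidable (Spec_devolverMatrices matrices out) := by unfold Spec_devolverMatrices; infer_instance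

-- ===== CLAIM (what is proved, stated in full; the proofs are below) =====
def Claim_equal_devolverMatrices : Prop := ∀ (matrices : List (List Int)), Dom_devolverMatrices matrices → Spec_devolverMatrices matrices (devolverMatrices matrices)

-- ===== LEMMAS AND PROOFS =====

-- reference chunking: complete groups of 8, incomplete tail dropped
def chunks8 (xs : List Int) : List (List Int) :=
  if h : 8 ≤ xs.length then xs.take 8 :: chunks8 (xs.drop 8) else []
  termination_by xs.length
  decreasing_by simp; omega

theorem chunks8_short {xs : List Int} (h : xs.length < 8) : chunks8 xs = [] := by
  rw [chunks8]; simp [Nat.not_le.mpr h]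

theorem chunks8_long {xs : List Int} (h : 8 ≤ xs.length) :
    chunks8 xs = xs.take 8 :: chunks8 (xs.drop 8) := by
  rw [chunks8]; simp [h]

theorem pyInsert_len {α : Type} (xs : List α) (v : α) :
    PySem.List.insert xs (xs.length : Int) v = xs ++ [v] := by
  have h : ¬ ((xs.length : Int) < 0) := by omega
  simp [PySem.List.insert, PySem.List.sliceIndices, h]

-- A's loop over a flat stream of elements, from a partially filled provisional buffer
theorem foldl_devAStep (l : List Int) :
    ∀ (prov : List Int) (comp : List (List Int)), prov.length < 8 →
    (l.foldl devAStep (prov, (prov.length : Int), comp)).2.2 = comp ++ chunks8 (prov ++ l) := by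
  induction l with
  | nil =>
    intro prov comp h
    simp [chunks8_short h]
  | cons x l ih =>
    intro prov comp h
    have hlt : ((prov.length : Int)) < 8 := by omega
    by_cases h8 : prov.length = 7
    · have hstep : devAStep (prov, (prov.length : Int), comp) x
          = ([], 0, comp ++ [prov ++ [x]]) := by
        simp only [devAStep, pyInsert_len]
        rw [if_pos hlt, if_pos (show ((prov.length : Int)) + 1 = 8 by omega)]
      have h0 : ((0 : Int)) = (([] : List Int).length : Int) := by simp
      rw [List.foldl_cons, hstep]
      have := ih [] (comp ++ [prov ++ [x]]) (by simp)
      simp only [List.length_nil, Nat.cast_zero] at this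
      rw [this]
      have hch : chunks8 (prov ++ x :: l) = (prov ++ [x]) :: chunks8 l := by
        have hlen : (prov ++ [x]).length = 8 := by simp [h8]
        have hsplit : prov ++ x :: l = (prov ++ [x]) ++ l := by simp
        rw [hsplit, chunks8_long (by simp; omega),
            List.take_left' hlen, List.drop_left' hlen]
      rw [hch]; simp
    · have hstep : devAStep (prov, (prov.length : Int), comp) x
          = (prov ++ [x], ((prov ++ [x]).length : Int), comp) := by
        simp only [devAStep, pyInsert_len]
        rw [if_pos hlt, if_neg (show ¬ (((prov.length : Int)) + 1 = 8) by omega)]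
        simp
      rw [List.foldl_cons, hstep, ih (prov ++ [x]) comp (by simp; omega)]
      simp

-- folding ++ over the rows is flattening
theorem foldl_append_eq_flatten (L : List (List Int)) : ∀ acc : List Int,
    L.foldl (fun a i => a ++ i) acc = acc ++ L.flatten := by
  induction L with
  | nil => intro acc; simp
  | cons y L ih => intro acc; simp [ih]

-- B's slicing pass computes the same chunking
theorem map_slice_eq_chunks8 (xs : List Int) :
    (List.range (xs.length / 8)).map
      (fun k => List.take 8 (List.drop (k * 8) xs)) = chunks8 xs := by
  induction hn : xs.length / 8 generalizing xs with
  | zero =>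
    have : xs.length < 8 := by omega
    simp [chunks8_short this]
  | succ n ih =>
    have h8 : 8 ≤ xs.length := by
      by_contra hc
      have : xs.length / 8 = 0 := by omega
      omega
    rw [chunks8_long h8, List.range_succ_eq_map, List.map_cons, List.map_map]
    have hdrop : (xs.drop 8).length / 8 = n := by
      have : (xs.drop 8).length = xs.length - 8 := by simp
      omega
    have := ih (xs.drop 8) hdrop
    rw [← this]
    have hmap : List.map ((fun k => List.take 8 (List.drop (k * 8) xs)) ∘ Nat.succ) (List.range n)
        = List.map (fun k => List.take 8 (List.drop (k * 8) (List.drop 8 xs))) (List.range n) := by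
      apply List.map_congr_left
      intro k _
      simp only [Function.comp_apply, List.drop_drop]
      congr 1
      congr 1
      omega
    rw [hmap]
    norm_num

-- ===== VERDICT (by name: the statement is the Claim_ definition above) =====
theorem devolverMatrices_spec : Claim_equal_devolverMatrices := by
  intro matrices _
  unfold Spec_devolverMatrices devolverMatrices devolverMatrices_alt
  rw [← List.foldl_flatten]
  rw [show List.foldl (fun acc i => acc ++ i) ([] : List Int) matrices = matrices.flatten from by
        simpa using foldl_append_eq_flatten matrices []]
  set xs := matrices.flatten with hxs
  have hA := foldl_devAStep xs [] [] (by simp)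
  simp only [List.length_nil, Nat.cast_zero, List.nil_append] at hA
  rw [hA]
  show chunks8 xs = List.map
      (fun k => PySem.List.slice xs (some (k * 8)) (some ((k + 1) * 8)))
      (PySem.List.pyRange 0 (PySem.Int.floordiv ((xs.length : Int)) 8) 1)
  have hfd : PySem.Int.floordiv (xs.length : Int) 8 = ((xs.length / 8 : Nat) : Int) := by
    exact_mod_cast PySem.Int.floordiv_natCast xs.length 8
  rw [hfd, PySem.List.pyRange_zero_nat, List.map_map, ← map_slice_eq_chunks8 xs]
  apply List.map_congr_left
  intro k _
  simp only [Function.comp_apply]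
  rw [show ((k : Int) + 1) * 8 = ((k * 8 : Nat) : Int) + ((8 : Nat) : Int) by push_cast; ring,
      show ((k : Int)) * 8 = ((k * 8 : Nat) : Int) by push_cast; ring,
      PySem.List.slice_natCast_add]
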